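-- pv_equiv track=rewrite | github.com/AniRoy10/Coding-a-Decoder-only-Transformer- | load_corpus.py | tokenize_corpus
-- ===== SOURCE A (Python) =====
-- def tokenize_corpus(corpus):
--     """Tokenizes the given corpus into words and assigns unique indices."""
--     token_to_id = {}
--     id_to_token = {}
--     current_id = 0
--
--     for sentence in corpus:
--         words = sentence.split()
--         for word in words:
--             if word not in token_to_id:
--                 token_to_id[word] = current_id
--                 id_to_token[current_id] = word
--                 current_id += 1
--
--     return token_to_id, id_to_token
-- ===== SOURCE B (Python) =====
-- def tokenize_corpus(corpus):
--     """Tokenizes the given corpus into words and assigns unique indices."""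
--     words = [w for sentence in corpus for w in sentence.split()]
--     # scanning the positions backwards makes the earliest position the last write,
--     # so `first` maps each word to its first-occurrence index
--     first = {w: p for p, w in reversed(list(enumerate(words)))}
--     order = sorted(first, key=first.get)
--     token_to_id = {w: i for i, w in enumerate(order)}
--     id_to_token = {i: w for i, w in enumerate(order)}
--     return token_to_id, id_to_token
-- ===== Notes on version B (the rewrite author's own statement) =====
-- stated objective: alternative
-- what changed: Instead of A's single interleaved loop threading two dicts and a counter through a membership test, B computes each word's first-occurrence position by overwriting a dict while scanning the enumerated word stream backwards, then SORTS the vocabulary by that position and enumerates the sorted list to build both maps.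
import Mathlib
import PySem

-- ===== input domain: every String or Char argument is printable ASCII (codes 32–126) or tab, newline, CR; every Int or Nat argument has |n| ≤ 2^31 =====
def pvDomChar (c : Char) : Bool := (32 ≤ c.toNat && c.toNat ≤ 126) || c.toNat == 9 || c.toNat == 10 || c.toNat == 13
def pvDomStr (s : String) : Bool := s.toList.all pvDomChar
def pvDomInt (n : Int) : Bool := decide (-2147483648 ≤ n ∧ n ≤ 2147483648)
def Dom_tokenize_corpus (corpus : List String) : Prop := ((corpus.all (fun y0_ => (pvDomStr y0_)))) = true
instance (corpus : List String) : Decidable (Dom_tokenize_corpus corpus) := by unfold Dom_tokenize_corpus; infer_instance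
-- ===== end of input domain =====

-- B replaces A's single interleaved membership-tested loop by a sort-based pipeline: first-occurrence
-- positions via a backwards overwrite of a dict, then sorting the vocabulary by position (objective: alternative).

-- ===== PORT A =====
-- the body of A's inner loop over words: state = (token_to_id, id_to_token, current_id)
def tokAStep (st : PySem.Dict String Int × PySem.Dict Int String × Int) (word : String) :
    PySem.Dict String Int × PySem.Dict Int String × Int :=
  if st.1.contains word then st
  else (st.1.insert word st.2.2, st.2.1.insert st.2.2 word, st.2.2 + 1)

def tokenize_corpus (corpus : List String) : (List (String × Int)) × (List (Int × String)) :=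
  let st := corpus.foldl (fun st sentence => (PySem.Str.split₀ sentence).foldl tokAStep st)
    (PySem.Dict.empty, PySem.Dict.empty, 0)
  (st.1.items, st.2.1.items)

-- ===== PORT B =====
def tokenize_corpus_alt (corpus : List String) : (List (String × Int)) × (List (Int × String)) :=
  let words : List String := corpus.flatMap (fun sentence => PySem.Str.split₀ sentence)
  -- {w: p for p, w in reversed(list(enumerate(words)))}
  let first : PySem.Dict String Int :=
    (PySem.List.enumerate words 0).reverse.foldl (fun d p => d.insert p.2 p.1) PySem.Dict.empty
  -- sorted(first, key=first.get): every key is present in `first`, so first.get == first.getD · 0 here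
  let order : List String := PySem.List.sorted first.keys (fun w => first.getD w 0)
  let token_to_id : PySem.Dict String Int :=
    (PySem.List.enumerate order 0).foldl (fun d p => d.insert p.2 p.1) PySem.Dict.empty
  let id_to_token : PySem.Dict Int String :=
    (PySem.List.enumerate order 0).foldl (fun d p => d.insert p.1 p.2) PySem.Dict.empty
  (token_to_id.items, id_to_token.items)

-- ===== PRECONDITION & SPEC =====
def Spec_tokenize_corpus (corpus : List String) (out : (List (String × Int)) × (List (Int × String))) : Prop := out = tokenize_corpus_alt corpus
instance (corpus : List String) (out : (List (String × Int)) × (List (Int × String))) : Decidable (Spec_tokenize_corpus corpus out) := by unfold Spec_tokenize_corpus; infer_instance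

-- ===== CLAIM (what is proved, stated in full; the proofs are below) =====
def Claim_equal_tokenize_corpus : Prop := ∀ (corpus : List String), Dom_tokenize_corpus corpus → Spec_tokenize_corpus corpus (tokenize_corpus corpus)

-- ===== LEMMAS AND PROOFS =====

-- A-SIDE: the state of A's loop after having seen exactly the distinct words u (in first-occurrence order)
def tokState (u : List String) : PySem.Dict String Int × PySem.Dict Int String × Int :=
  (PySem.Dict.mk ((PySem.List.enumerate u 0).map (fun p => (p.2, p.1))),
   PySem.Dict.mk (PySem.List.enumerate u 0),
   (u.length : Int))

lemma tokState_nil : tokState [] = (PySem.Dict.empty, PySem.Dict.empty, 0) := rfl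

lemma foldl_flatMap' {α β γ : Type} (g : β → α → β) (f : γ → List α) (l : List γ) (i : β) :
    (l.flatMap f).foldl g i = l.foldl (fun a x => (f x).foldl g a) i := by
  induction l generalizing i with
  | nil => rfl
  | cons x xs ih =>
    rw [List.flatMap_cons, List.foldl_append]
    exact ih _

lemma keys1_tokState (u : List String) : (tokState u).1.keys = u := by
  have : ((PySem.List.enumerate u 0).map (fun p => (p.2, p.1))).map (·.1)
      = (PySem.List.enumerate u 0).map (·.2) := by
    rw [List.map_map]; rfl
  simp only [tokState, PySem.Dict.keys]
  rw [this, PySem.List.map_snd_enumerate]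

lemma contains1_tokState (u : List String) (w : String) :
    (tokState u).1.contains w = decide (w ∈ u) := by
  rcases h : (tokState u).1.contains w with _ | _
  · simp only [eq_comm (a := false), decide_eq_false_iff_not]
    intro hm
    rw [← keys1_tokState u] at hm
    rw [← PySem.Dict.contains_iff_mem_keys] at hm
    simp [h] at hm
  · rw [PySem.Dict.contains_iff_mem_keys] at h
    rw [keys1_tokState] at h
    simp [h]

lemma fst_enumerate_not_mem (u : List String) :
    (u.length : Int) ∉ (PySem.List.enumerate u 0).map (·.1) := by
  rw [PySem.List.map_fst_enumerate]
  intro hm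
  have := PySem.List.mem_pyRange_one.mp hm
  omega

lemma tokAStep_tokState (u : List String) (w : String) :
    tokAStep (tokState u) w = tokState (PySem.Set.add u w) := by
  by_cases hw : w ∈ u
  · rw [PySem.Set.add_of_mem hw]
    simp [tokAStep, contains1_tokState, hw]
  · rw [PySem.Set.add_of_not_mem hw]
    have h22 : (tokState u).2.2 = ((u.length : Nat) : Int) := rfl
    simp only [tokAStep, contains1_tokState, hw, decide_false, Bool.false_eq_true, if_false, h22]
    have hc1 : (tokState u).1.contains w = false := by simp [contains1_tokState, hw]
    have hc2 : (tokState u).2.1.contains ((u.length : Int)) = false := by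
      rcases h : (tokState u).2.1.contains ((u.length : Int)) with _ | _
      · rfl
      · exfalso
        rw [PySem.Dict.contains_iff_mem_keys] at h
        exact fst_enumerate_not_mem u h
    apply Prod.ext
    · apply PySem.Dict.ext
      dsimp only
      rw [PySem.Dict.items_insert_of_not_contains (h := hc1)]
      show (PySem.List.enumerate u 0).map (fun p => (p.2, p.1)) ++ [(w, (u.length : Int))]
          = (PySem.List.enumerate (u ++ [w]) 0).map (fun p => (p.2, p.1))
      rw [PySem.List.enumerate_append]
      simp [PySem.List.enumerate]
    · apply Prod.ext
      · apply PySem.Dict.ext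
        dsimp only
        rw [PySem.Dict.items_insert_of_not_contains (h := hc2)]
        show PySem.List.enumerate u 0 ++ [((u.length : Int), w)] = PySem.List.enumerate (u ++ [w]) 0
        rw [PySem.List.enumerate_append]
        simp [PySem.List.enumerate]
      · show (u.length : Int) + 1 = ((u ++ [w]).length : Int)
        simp

lemma foldl_tokAStep (ws : List String) (u : List String) (hnd : u.Nodup) :
    ws.foldl tokAStep (tokState u) = tokState (PySem.Set.update u ws) := by
  induction ws generalizing u with
  | nil => rfl
  | cons w ws ih =>
    rw [List.foldl_cons, tokAStep_tokState u w, PySem.Set.update_cons]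
    exact ih _ (PySem.Set.nodup_add u w hnd)

-- B-SIDE: the dict {w: p for p, w in reversed(list(enumerate(ws, s)))}, built from the back
def firstDict : List String → Int → PySem.Dict String Int
  | [], _ => PySem.Dict.empty
  | w :: t, s => (firstDict t (s + 1)).insert w s

lemma foldl_rev_enum_eq_firstDict (ws : List String) (s : Int) :
    (PySem.List.enumerate ws s).reverse.foldl (fun d p => d.insert p.2 p.1) PySem.Dict.empty
      = firstDict ws s := by
  induction ws generalizing s with
  | nil => rfl
  | cons w t ih =>
    rw [PySem.List.enumerate_cons, List.reverse_cons, List.foldl_append, ih]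
    rfl

lemma getD_firstDict (ws : List String) (s : Int) (w : String) (h : w ∈ ws) :
    (firstDict ws s).getD w 0 = s + (ws.idxOf w : Int) := by
  induction ws generalizing s with
  | nil => cases h
  | cons x t ih =>
    by_cases hx : w = x
    · subst hx
      rw [firstDict, PySem.Dict.getD_insert_self, List.idxOf_cons_self]
      simp
    · have hmem : w ∈ t := by
        rcases List.mem_cons.mp h with h' | h'
        · exact absurd h' hx
        · exact h'
      have hx' : x ≠ w := fun h => hx h.symm
      rw [firstDict, PySem.Dict.getD_insert_of_ne _ _ _ hx, ih (s + 1) hmem,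
        List.idxOf_cons_ne _ hx']
      push_cast
      ring

lemma mem_keys_firstDict (ws : List String) (s : Int) (w : String) :
    w ∈ (firstDict ws s).keys ↔ w ∈ ws := by
  induction ws generalizing s with
  | nil =>
    simp [firstDict, PySem.Dict.keys_empty]
  | cons x t ih =>
    rw [firstDict]
    rw [PySem.Dict.mem_keys_insert]
    simp [ih]

lemma nodup_keys_firstDict (ws : List String) (s : Int) : (firstDict ws s).keys.Nodup := by
  induction ws generalizing s with
  | nil => simp [firstDict, PySem.Dict.keys_empty]
  | cons x t ih => exact PySem.Dict.nodup_keys_insert _ _ _ (ih (s + 1))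

-- first-occurrence positions are strictly increasing along the deduplicated vocabulary
lemma pairwise_idxOf_update (full : List String) (ws : List String) : ∀ (pre : List String),
    full = pre ++ ws →
    (PySem.Set.ofList pre).Pairwise (fun a b => full.idxOf a < full.idxOf b) →
    (PySem.Set.update (PySem.Set.ofList pre) ws).Pairwise
      (fun a b => full.idxOf a < full.idxOf b) := by
  induction ws with
  | nil =>
    intro pre _ hpw
    exact hpw
  | cons w t ih =>
    intro pre heq hpw
    have hof : PySem.Set.ofList (pre ++ [w]) = PySem.Set.add (PySem.Set.ofList pre) w := by
      simp [PySem.Set.ofList, List.foldl_append]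
    rw [PySem.Set.update_cons, ← hof]
    have heq' : full = (pre ++ [w]) ++ t := by rw [heq]; simp
    apply ih (pre ++ [w]) heq'
    by_cases hw : w ∈ pre
    · rw [hof, PySem.Set.add_of_mem ((PySem.Set.mem_ofList pre w).mpr hw)]
      exact hpw
    · rw [hof, PySem.Set.add_of_not_mem (fun hm => hw ((PySem.Set.mem_ofList pre w).mp hm))]
      rw [List.pairwise_append]
      refine ⟨hpw, List.pairwise_singleton _ _, ?_⟩
      intro a ha b hb
      have hb' : b = w := by simpa using hb
      subst hb'
      have hapre : a ∈ pre := (PySem.Set.mem_ofList pre a).mp ha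
      have h3 : pre.idxOf a < pre.length := List.idxOf_lt_length_of_mem hapre
      rw [heq, List.idxOf_append, List.idxOf_append, if_pos hapre, if_neg hw,
        List.idxOf_cons_self]
      omega

lemma pairwise_idxOf_ofList (ws : List String) :
    (PySem.Set.ofList ws).Pairwise (fun a b => ws.idxOf a < ws.idxOf b) := by
  have := pairwise_idxOf_update ws ws [] (by simp) (by constructor)
  rwa [show PySem.Set.ofList ([] : List String) = [] from rfl,
    PySem.Set.update_nil_left] at this

lemma order_eq (ws : List String) :
    PySem.List.sorted (firstDict ws 0).keys (fun w => (firstDict ws 0).getD w 0)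
      = PySem.Set.ofList ws := by
  apply PySem.List.sorted_eq_of_perm_of_pairwise_lt
  · rw [List.perm_ext_iff_of_nodup (PySem.Set.nodup_ofList ws) (nodup_keys_firstDict ws 0)]
    intro a
    rw [PySem.Set.mem_ofList, mem_keys_firstDict]
  · apply (pairwise_idxOf_ofList ws).imp_of_mem
    intro a b ha hb hlt
    have ha' : a ∈ ws := (PySem.Set.mem_ofList ws a).mp ha
    have hb' : b ∈ ws := (PySem.Set.mem_ofList ws b).mp hb
    rw [getD_firstDict ws 0 a ha', getD_firstDict ws 0 b hb']
    omega

lemma items_enum_fold_snd (u : List String) (hnd : u.Nodup) :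
    ((PySem.List.enumerate u 0).foldl (fun d p => d.insert p.2 p.1)
        (PySem.Dict.empty : PySem.Dict String Int)).items
      = (PySem.List.enumerate u 0).map (fun p => (p.2, p.1)) := by
  rw [PySem.Dict.items_foldl_insert_fresh (PySem.List.enumerate u 0)
        (fun p => p.2) (fun p => p.1) PySem.Dict.empty
        (fun a _ => PySem.Dict.contains_empty _)
        (by rw [PySem.List.map_snd_enumerate]; exact hnd)]
  rfl

lemma items_enum_fold_fst (u : List String) :
    ((PySem.List.enumerate u 0).foldl (fun d p => d.insert p.1 p.2)
        (PySem.Dict.empty : PySem.Dict Int String)).items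
      = PySem.List.enumerate u 0 := by
  rw [PySem.Dict.items_foldl_insert_fresh (PySem.List.enumerate u 0)
        (fun p => p.1) (fun p => p.2) PySem.Dict.empty
        (fun a _ => PySem.Dict.contains_empty _)
        (List.pairwise_map.mpr
          ((PySem.List.pairwise_lt_enumerate u (0 : Int)).imp (fun h => ne_of_lt h)))]
  rw [show (PySem.Dict.empty : PySem.Dict Int String).items = [] from rfl]
  simp

-- ===== VERDICT (by name: the statement is the Claim_ definition above) =====
theorem tokenize_corpus_spec : Claim_equal_tokenize_corpus := by
  intro corpus _
  show tokenize_corpus corpus = tokenize_corpus_alt corpus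
  unfold tokenize_corpus tokenize_corpus_alt
  rw [← foldl_flatMap' tokAStep (fun s => PySem.Str.split₀ s) corpus, ← tokState_nil,
    foldl_tokAStep _ [] List.nodup_nil, PySem.Set.update_nil_left]
  simp only []
  rw [foldl_rev_enum_eq_firstDict, order_eq]
  rw [items_enum_fold_snd _ (PySem.Set.nodup_ofList _), items_enum_fold_fst]
  rfl
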